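-- pv_equiv track=rewrite | github.com/wjmallard/twitter-screenshot-search | src/twitter_screenshot_archive/mcp/utils.py | _merge_similar_handles
-- ===== SOURCE A (Python) =====
-- def _merge_similar_handles(
--     user_counts: dict[str, int],
--     primary: str | None = None,
-- ) -> dict[str, int]:
--     """Group handles by prefix overlap, keeping the longest variant.
--
--     OCR frequently truncates handles — @bonzerba, @bon, @bonzerb are all
--     fragments of @bonzerbarry.  This merges their counts into the longest
--     matching handle.
--
--     When *primary* is provided, also excludes any handle that is a prefix of
--     or prefixed by the primary handle (catches both the full handle and its
--     OCR fragments).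
--     """
--     # Process longest first — the longest variant becomes canonical
--     sorted_handles = sorted(user_counts, key=len, reverse=True)
--
--     merged: dict[str, int] = {}
--
--     for h in sorted_handles:
--         # Skip fragments of the primary handle
--         if primary and (h.startswith(primary) or primary.startswith(h)):
--             continue
--
--         # Check if h is a prefix of any existing canonical handle
--         matched = False
--         for canonical in merged:
--             if canonical.startswith(h):
--                 merged[canonical] += user_counts[h]
--                 matched = True
--                 break
--
--         if not matched:
--             merged[h] = user_counts[h]
--
--     return merged
-- ===== SOURCE B (Python) =====
-- def _merge_similar_handles(
--     user_counts: dict[str, int],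
--     primary: str | None = None,
-- ) -> dict[str, int]:
--     """Same merge, done in stages: drop primary fragments up front, iterate
--     (handle, count) items longest-first, and resolve each handle by one lookup
--     in a prefix->owner dict (a flattened trie filled when a handle becomes
--     canonical) instead of scanning every existing canonical."""
--     items = sorted(user_counts.items(), key=lambda kv: len(kv[0]), reverse=True)
--     if primary:
--         items = [kv for kv in items
--                  if not (kv[0].startswith(primary) or primary.startswith(kv[0]))]
--
--     owner: dict[str, str] = {}
--     merged: dict[str, int] = {}
--     for h, n in items:
--         if h in owner:
--             merged[owner[h]] += n
--         else:
--             merged[h] = n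
--             for i in range(len(h) + 1):
--                 p = h[:i]
--                 if p not in owner:
--                     owner[p] = h
--     return merged
-- ===== Notes on version B (the rewrite author's own statement) =====
-- stated objective: faster
-- what changed: B pre-filters primary fragments, iterates (handle,count) items instead of re-looking counts up, and replaces A's per-handle linear scan over all canonicals by one lookup in a prefix->owner dict (a flattened trie) filled once when a handle becomes canonical.
import Mathlib
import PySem

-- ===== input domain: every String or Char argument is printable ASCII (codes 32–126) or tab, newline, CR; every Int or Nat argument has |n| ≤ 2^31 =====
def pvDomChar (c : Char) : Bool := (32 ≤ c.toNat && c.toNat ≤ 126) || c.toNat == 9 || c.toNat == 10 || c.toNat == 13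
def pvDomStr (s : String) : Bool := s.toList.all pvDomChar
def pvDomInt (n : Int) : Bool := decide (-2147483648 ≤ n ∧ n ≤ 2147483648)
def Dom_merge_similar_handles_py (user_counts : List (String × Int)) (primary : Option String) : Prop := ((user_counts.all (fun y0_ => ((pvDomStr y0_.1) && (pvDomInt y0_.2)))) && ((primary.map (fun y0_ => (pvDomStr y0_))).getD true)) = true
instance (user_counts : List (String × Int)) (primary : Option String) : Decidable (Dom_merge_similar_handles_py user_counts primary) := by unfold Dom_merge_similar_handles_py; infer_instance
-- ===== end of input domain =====

-- B pre-filters primary fragments and replaces A's per-handle scan over the canonicals by one lookup in a prefix->owner dict filled per canonical; return value only (no argument is mutated).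


-- the input dict (association list) marshalled exactly as Python's dict constructor
def pvUC (user_counts : List (String × Int)) : PySem.Dict String Int := PySem.Dict.ofList user_counts

-- ===== PORT A =====
-- the guard 'primary and (h.startswith(primary) or primary.startswith(h))'
def pvSkip (primary : Option String) (h : String) : Bool :=
  match primary with
  | none => false
  | some p => !(p == "") && (PySem.Str.startswith h p || PySem.Str.startswith p h)

-- the inner 'for canonical in merged: … break' with the 'matched' flag is: first key of merged with canonical.startswith(h)
def pvStepA (uc : PySem.Dict String Int) (primary : Option String)
    (merged : PySem.Dict String Int) (h : String) : PySem.Dict String Int :=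
  if pvSkip primary h then merged
  else
    match merged.keys.find? (fun c => PySem.Str.startswith c h) with
    | some c => merged.modify c 0 (· + uc.getD h 0)
    | none => merged.insert h (uc.getD h 0)

def merge_similar_handles_py (user_counts : List (String × Int)) (primary : Option String) : List (String × Int) :=
  ((PySem.List.sorted (pvUC user_counts).keys (fun h => PySem.Str.len h) true).foldl
      (pvStepA (pvUC user_counts) primary) PySem.Dict.empty).items

-- ===== PORT B =====
-- 'if primary: items = [kv for kv in items if not (kv[0].startswith(primary) or primary.startswith(kv[0]))]'
def pvFilterPrimary (primary : Option String) (items : List (String × Int)) : List (String × Int) :=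
  match primary with
  | none => items
  | some p =>
      if p == "" then items
      else items.filter (fun kv => !(PySem.Str.startswith kv.1 p || PySem.Str.startswith p kv.1))

-- 'for i in range(len(h)+1): p = h[:i]; if p not in owner: owner[p] = h'
def pvClaimPrefixes (owner : PySem.Dict String String) (h : String) : PySem.Dict String String :=
  (PySem.List.pyRange 0 (PySem.Str.len h + 1) 1).foldl
    (fun o i =>
      let p := PySem.Str.slice h none (some i)
      if o.contains p then o else o.insert p h) owner

def pvStepB (st : PySem.Dict String String × PySem.Dict String Int) (kv : String × Int) :
    PySem.Dict String String × PySem.Dict String Int :=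
  match st.1.get? kv.1 with
  | some c => (st.1, st.2.modify c 0 (· + kv.2))
  | none => (pvClaimPrefixes st.1 kv.1, st.2.insert kv.1 kv.2)

def merge_similar_handles_py_alt (user_counts : List (String × Int)) (primary : Option String) : List (String × Int) :=
  ((pvFilterPrimary primary
      (PySem.List.sorted (pvUC user_counts).items (fun kv => PySem.Str.len kv.1) true)).foldl
      pvStepB (PySem.Dict.empty, PySem.Dict.empty)).2.items

-- ===== PRECONDITION & SPEC =====
def Spec_merge_similar_handles_py (user_counts : List (String × Int)) (primary : Option String) (out : List (String × Int)) : Prop := out = merge_similar_handles_py_alt user_counts primary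
instance (user_counts : List (String × Int)) (primary : Option String) (out : List (String × Int)) : Decidable (Spec_merge_similar_handles_py user_counts primary out) := by unfold Spec_merge_similar_handles_py; infer_instance

-- ===== CLAIM (what is proved, stated in full; the proofs are below) =====
def Claim_equal_merge_similar_handles_py : Prop := ∀ (user_counts : List (String × Int)) (primary : Option String), Dom_merge_similar_handles_py user_counts primary → Spec_merge_similar_handles_py user_counts primary (merge_similar_handles_py user_counts primary)

-- ===== LEMMAS AND PROOFS =====

-- A's loop, re-expressed over (key, value) pairs: first the guarded step, then the unguarded body
def pvStepA3 (merged : PySem.Dict String Int) (kv : String × Int) : PySem.Dict String Int :=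
  match merged.keys.find? (fun c => PySem.Str.startswith c kv.1) with
  | some c => merged.modify c 0 (· + kv.2)
  | none => merged.insert kv.1 kv.2

-- mapping under insertBy when the order predicate factors through the map
lemma pv_map_insertBy {α β : Type} (f : α → β) (p : β → β → Bool) (x : α) (ys : List α) :
    (PySem.List.insertBy (fun a b => p (f a) (f b)) x ys).map f =
      PySem.List.insertBy p (f x) (ys.map f) := by
  induction ys with
  | nil => rfl
  | cons y ys ih =>
      simp only [PySem.List.insertBy]
      by_cases h : p (f x) (f y)
      · simp [PySem.List.insertBy, h]
      · simp [PySem.List.insertBy, h, ih]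

lemma pv_map_foldl_insertBy {α β : Type} (f : α → β) (p : β → β → Bool) :
    ∀ (xs : List α) (acc : List α),
      (xs.foldl (fun acc x => PySem.List.insertBy (fun a b => p (f a) (f b)) x acc) acc).map f =
        (xs.map f).foldl (fun acc y => PySem.List.insertBy p y acc) (acc.map f) := by
  intro xs
  induction xs with
  | nil => intro acc; rfl
  | cons x xs ih =>
      intro acc
      simp only [List.foldl_cons, List.map_cons, ih, pv_map_insertBy]

-- sorting the items by len∘fst and projecting = sorting the keys by len
lemma pv_sorted_keys_eq (d : PySem.Dict String Int) :
    PySem.List.sorted d.keys (fun h => PySem.Str.len h) true =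
      (PySem.List.sorted d.items (fun kv => PySem.Str.len kv.1) true).map Prod.fst := by
  rw [PySem.List.sorted_rev_eq_foldl_insertBy, PySem.List.sorted_rev_eq_foldl_insertBy]
  have hkeys : d.keys = d.items.map Prod.fst := rfl
  rw [hkeys]
  exact (pv_map_foldl_insertBy Prod.fst
    (fun a b => decide (PySem.Str.len b < PySem.Str.len a)) d.items []).symm

-- B's invariant: the prefix dict 'owner' answers exactly A's linear first-match scan over merged's keys.
def pvInv (owner : PySem.Dict String String) (merged : PySem.Dict String Int) : Prop :=
  merged.keys.Nodup ∧
  ∀ s : String, owner.get? s = merged.keys.find? (fun c => PySem.Str.startswith c s)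

lemma pv_get?_setdefault (d : PySem.Dict String String) (k v : String) (s : String) :
    (d.setdefault k v).get? s = (d.get? s).or (if s = k then some v else none) := by
  by_cases hs : s = k
  · subst hs
    rw [PySem.Dict.get?_setdefault_self]
    cases h : d.get? s <;> simp [Option.getD, Option.or]
  · rw [PySem.Dict.get?_setdefault_of_ne d v hs]
    cases h : d.get? s <;> simp [hs, Option.or]

lemma pv_get?_foldl_setdefault (ps : List String) (v : String) :
    ∀ (d : PySem.Dict String String) (s : String),
      (ps.foldl (fun b p => b.setdefault p v) d).get? s =
        (d.get? s).or (if s ∈ ps then some v else none) := by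
  induction ps with
  | nil => intro d s; cases h : d.get? s <;> simp [Option.or, h]
  | cons p rest ih =>
      intro d s
      simp only [List.foldl_cons, ih, pv_get?_setdefault, List.mem_cons]
      by_cases h1 : s = p
      · cases h : d.get? s <;> simp [h1, Option.or]
      · by_cases h2 : s ∈ rest <;> cases h : d.get? s <;> simp [h1, h2, Option.or]

-- B's 'if p not in owner: owner[p] = h' body is dict.setdefault
lemma pv_claim_eq_setdefault (owner : PySem.Dict String String) (h : String) :
    pvClaimPrefixes owner h =
      (PySem.List.pyRange 0 (PySem.Str.len h + 1) 1).foldl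
        (fun o i => o.setdefault (PySem.Str.slice h none (some i)) h) owner := by
  unfold pvClaimPrefixes
  refine PySem.List.foldl_congr_mem _ _ _ _ (fun o i _ => ?_)
  by_cases hc : o.contains (PySem.Str.slice h none (some i))
  · simp only [hc, if_true, PySem.Dict.setdefault_of_contains _ _ hc]
  · simp only [Bool.not_eq_true] at hc
    simp only [hc, Bool.false_eq_true, if_false,
      PySem.Dict.setdefault_of_not_contains _ _ hc]

-- the strings produced by 'for i in range(len(h)+1): h[:i]' are exactly the prefixes of h
lemma pv_mem_prefixes (h s : String) :
    (s ∈ (PySem.List.pyRange 0 (PySem.Str.len h + 1) 1).map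
        (fun i => PySem.Str.slice h none (some i))) ↔ PySem.Str.startswith h s = true := by
  rw [PySem.Str.startswith_eq, PySem.Chars.startswith_iff]
  constructor
  · intro hs
    rcases List.mem_map.mp hs with ⟨i, hi, rfl⟩
    rw [PySem.List.mem_pyRange_one] at hi
    have ht : (PySem.Str.slice h none (some i)).toList = h.toList.take i.toNat := by
      rw [PySem.Str.toList_slice, PySem.Chars.slice_eq_listSlice, PySem.List.slice_to _ hi.1]
    rw [ht]
    exact List.take_prefix _ _
  · intro hp
    apply List.mem_map.mpr
    refine ⟨(s.toList.length : Int), ?_, ?_⟩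
    · rw [PySem.List.mem_pyRange_one]
      have hle := hp.length_le
      rw [PySem.Str.len_eq]
      omega
    · apply String.toList_inj.mp
      rw [PySem.Str.toList_slice, PySem.Chars.slice_eq_listSlice,
        PySem.List.slice_to _ (by positivity), Int.toNat_natCast]
      exact (List.prefix_iff_eq_take.mp hp).symm

lemma pv_step_eq (owner : PySem.Dict String String) (merged : PySem.Dict String Int)
    (kv : String × Int) (hinv : pvInv owner merged) :
    (pvStepB (owner, merged) kv).2 = pvStepA3 merged kv ∧
      pvInv (pvStepB (owner, merged) kv).1 (pvStepB (owner, merged) kv).2 := by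
  obtain ⟨hnd, hown⟩ := hinv
  unfold pvStepA3 pvStepB
  cases hc : merged.keys.find? (fun c => PySem.Str.startswith c kv.1) with
  | some c =>
      have hb : owner.get? kv.1 = some c := (hown kv.1).trans hc
      simp only [hb]
      refine ⟨trivial, ?_, ?_⟩
      · rwa [PySem.Dict.keys_modify, PySem.Dict.keys_insert_of_contains _ _
          ((PySem.Dict.contains_iff_mem_keys _ _).mpr (List.mem_of_find?_eq_some hc))]
      · intro s
        rw [PySem.Dict.keys_modify, PySem.Dict.keys_insert_of_contains _ _
          ((PySem.Dict.contains_iff_mem_keys _ _).mpr (List.mem_of_find?_eq_some hc))]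
        exact hown s
  | none =>
      have hb : owner.get? kv.1 = none := (hown kv.1).trans hc
      simp only [hb]
      have hnotmem : kv.1 ∉ merged.keys := by
        intro hmem
        have : (merged.keys.find? (fun c => PySem.Str.startswith c kv.1)).isSome = true :=
          List.find?_isSome.mpr ⟨kv.1, hmem, by
            rw [PySem.Str.startswith_eq, PySem.Chars.startswith_iff]⟩
        rw [hc] at this
        exact Bool.noConfusion this
      have hcont : merged.contains kv.1 = false := by
        cases hh : merged.contains kv.1
        · rfl
        · exact absurd ((PySem.Dict.contains_iff_mem_keys _ _).mp hh) hnotmem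
      have hkeys : (merged.insert kv.1 kv.2).keys = merged.keys ++ [kv.1] :=
        PySem.Dict.keys_insert_of_not_contains _ _ hcont
      refine ⟨trivial, ?_, ?_⟩
      · rw [hkeys]
        refine hnd.append (List.nodup_singleton kv.1) ?_
        intro a ha hb
        rw [List.mem_singleton] at hb
        exact hnotmem (hb ▸ ha)
      · intro s
        rw [hkeys, List.find?_append, pv_claim_eq_setdefault, ← List.foldl_map
          (f := fun i => PySem.Str.slice kv.1 none (some i))
          (g := fun b p => PySem.Dict.setdefault b p kv.1),
          pv_get?_foldl_setdefault, hown s]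
        congr 1
        by_cases hsw : PySem.Str.startswith kv.1 s = true
        · rw [if_pos ((pv_mem_prefixes kv.1 s).mpr hsw)]
          have hsw' : PySem.Chars.startswith kv.1.toList s.toList = true := by
            rw [← PySem.Str.startswith_eq]; exact hsw
          simp [hsw']
        · rw [if_neg (fun hm => hsw ((pv_mem_prefixes kv.1 s).mp hm))]
          have hsw' : PySem.Chars.startswith kv.1.toList s.toList = false := by
            rw [← PySem.Str.startswith_eq]; exact Bool.eq_false_iff.mpr (fun e => hsw e)
          simp [hsw']

lemma pv_loop_eq :
    ∀ (hs : List (String × Int)) (owner : PySem.Dict String String)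
      (merged : PySem.Dict String Int), pvInv owner merged →
      (hs.foldl pvStepB (owner, merged)).2 = hs.foldl pvStepA3 merged := by
  intro hs
  induction hs with
  | nil => intro owner merged _; rfl
  | cons kv rest ih =>
      intro owner merged hinv
      obtain ⟨heq, hinv'⟩ := pv_step_eq owner merged kv hinv
      have h2 : (rest.foldl pvStepB (pvStepB (owner, merged) kv)).2 =
          rest.foldl pvStepA3 (pvStepB (owner, merged) kv).2 := by
        have := ih (pvStepB (owner, merged) kv).1 (pvStepB (owner, merged) kv).2 hinv'
        simpa using this
      simp only [List.foldl_cons]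
      rw [h2, heq]

-- B's up-front filter = A's per-iteration skip
lemma pv_filter_eq (primary : Option String) (items : List (String × Int)) :
    pvFilterPrimary primary items = items.filter (fun kv => !pvSkip primary kv.1) := by
  unfold pvFilterPrimary pvSkip
  cases primary with
  | none => simp
  | some p =>
      by_cases hp : p == ""
      · simp [hp]
      · simp only [hp, Bool.false_eq_true, if_false, Bool.not_false, Bool.true_and]

-- ===== VERDICT (by name: the statement is the Claim_ definition above) =====
theorem merge_similar_handles_py_spec : Claim_equal_merge_similar_handles_py := by
  intro user_counts primary _
  unfold Spec_merge_similar_handles_py merge_similar_handles_py merge_similar_handles_py_alt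
  rw [pv_sorted_keys_eq, List.foldl_map, pv_filter_eq,
    pv_loop_eq _ _ _ ⟨PySem.Dict.nodup_keys_empty, fun s => by
      rw [PySem.Dict.get?_empty, PySem.Dict.keys_empty]; rfl⟩]
  rw [← PySem.List.foldl_if_eq_foldl_filter (fun kv => !pvSkip primary kv.1) pvStepA3]
  refine congrArg _ (PySem.List.foldl_congr_mem' _ _ _ _ (fun kv hm m => ?_))
  have hmem : kv ∈ (pvUC user_counts).items := by
    exact (PySem.List.mem_sorted _ _ _ _).mp hm
  have hget : (pvUC user_counts).getD kv.1 0 = kv.2 :=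
    PySem.Dict.getD_of_mem_items _ (by simpa using hmem) (PySem.Dict.nodup_keys_ofList _) 0
  unfold pvStepA pvStepA3
  by_cases hsk : pvSkip primary kv.1
  · simp [hsk]
  · simp only [hsk, Bool.false_eq_true, if_false, Bool.not_false, if_true, hget]
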